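-- pv_equiv track=rewrite | github.com/afkpua-a11y/Qualitive-data-check-2 | validator_lib.py | offset_to_page
-- ===== SOURCE A (Python) =====
-- from typing import List, Dict, Any, Optional
--
-- def offset_to_page(global_offset: int, page_texts: Optional[list]) -> Optional[int]:
--     if not page_texts:
--         return None
--     acc = 0
--     for i, pg in enumerate(page_texts, start=1):
--         nxt = acc + len(pg) + 1
--         if global_offset < nxt:
--             return i
--         acc = nxt
--     return len(page_texts)
-- ===== SOURCE B (Python) =====
-- def offset_to_page(global_offset, page_texts):
--     if not page_texts:
--         return None
--     # prefix-sum boundary list: cum[i] = total length (with separators) of the first i pages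
--     cum = [0]
--     acc = 0
--     for pg in page_texts:
--         acc += len(pg) + 1
--         cum.append(acc)
--     # hand-written bisect_right over the sorted boundary list
--     lo, hi = 0, len(cum)
--     while lo < hi:
--         mid = (lo + hi) // 2
--         if global_offset < cum[mid]:
--             hi = mid
--         else:
--             lo = mid + 1
--     return max(1, min(lo, len(page_texts)))
-- ===== Notes on version B (the rewrite author's own statement) =====
-- stated objective: alternative
-- what changed: Replaces A's linear scan with per-page early return by building a prefix-sum boundary list once and locating the page with a hand-written bisect_right binary search whose result is clamped into [1, n].
import Mathlib
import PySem

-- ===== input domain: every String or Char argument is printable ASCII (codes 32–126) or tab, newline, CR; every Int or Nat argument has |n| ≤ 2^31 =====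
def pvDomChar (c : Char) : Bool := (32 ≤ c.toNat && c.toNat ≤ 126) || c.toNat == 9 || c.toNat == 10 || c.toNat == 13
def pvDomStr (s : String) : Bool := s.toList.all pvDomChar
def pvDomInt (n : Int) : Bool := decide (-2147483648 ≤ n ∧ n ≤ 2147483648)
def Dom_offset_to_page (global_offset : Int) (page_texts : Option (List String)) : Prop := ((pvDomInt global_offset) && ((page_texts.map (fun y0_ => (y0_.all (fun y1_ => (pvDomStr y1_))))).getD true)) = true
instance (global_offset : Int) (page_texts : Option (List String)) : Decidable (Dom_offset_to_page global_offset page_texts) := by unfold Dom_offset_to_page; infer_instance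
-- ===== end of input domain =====

-- B replaces A's linear scan by a prefix-sum boundary list plus a hand-written
-- bisect_right binary search with clamping (objective: alternative decomposition).

-- ===== PORT A =====
-- the `for i, pg in enumerate(page_texts, start=1)` loop; none = fell off the loop
def offsetLoopA (global_offset : Int) : List String → Int → Int → Option Int
  | [], _, _ => none
  | pg :: rest, acc, i =>
    let nxt := acc + PySem.Str.len pg + 1
    if global_offset < nxt then some i else offsetLoopA global_offset rest nxt (i + 1)

def offset_to_page (global_offset : Int) (page_texts : Option (List String)) : Option Int :=
  match page_texts with
  | none => none
  | some [] => none            -- `if not page_texts: return None`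
  | some pages => some ((offsetLoopA global_offset pages 0 1).getD (pages.length : Int))

-- ===== PORT B =====
-- the `for pg in page_texts:` loop building (acc, cum)
def buildCum : List String → Int → List Int → Int × List Int
  | [], acc, cum => (acc, cum)
  | pg :: rest, acc, cum =>
      buildCum rest (acc + PySem.Str.len pg + 1) (cum ++ [acc + PySem.Str.len pg + 1])

-- the `while lo < hi:` bisect_right loop; lo,hi are Nats (always 0 ≤ lo ≤ hi ≤ len(cum)
-- in Python), so Nat `/ 2` coincides with Python's `//`; cum[mid] is always in range
-- there, so `getD` is exact.
def bsr (x : Int) (cum : List Int) (lo hi : Nat) : Nat :=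
  if _h : lo < hi then
    let mid := (lo + hi) / 2
    if x < cum.getD mid 0 then bsr x cum lo mid else bsr x cum (mid + 1) hi
  else lo
termination_by hi - lo
decreasing_by all_goals omega

def offset_to_page_alt (global_offset : Int) (page_texts : Option (List String)) : Option Int :=
  match page_texts with
  | none => none               -- `if not page_texts: return None`
  | some pages =>
    if pages.isEmpty then none -- `if not page_texts: return None` (empty list case)
    else
    let cum := (buildCum pages 0 [0]).2
    let lo := bsr global_offset cum 0 cum.length
    some (max 1 (min (lo : Int) (pages.length : Int)))

-- ===== PRECONDITION & SPEC =====
def Spec_offset_to_page (global_offset : Int) (page_texts : Option (List String)) (out : Option Int) : Prop := out = offset_to_page_alt global_offset page_texts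
instance (global_offset : Int) (page_texts : Option (List String)) (out : Option Int) : Decidable (Spec_offset_to_page global_offset page_texts out) := by unfold Spec_offset_to_page; infer_instance

-- ===== CLAIM (what is proved, stated in full; the proofs are below) =====
def Claim_equal_offset_to_page : Prop := ∀ (global_offset : Int) (page_texts : Option (List String)), Dom_offset_to_page global_offset page_texts → Spec_offset_to_page global_offset page_texts (offset_to_page global_offset page_texts)

-- ===== LEMMAS AND PROOFS =====

-- pure description of the boundary list that buildCum appends
def sums (a : Int) : List String → List Int
  | [] => []
  | pg :: rest => (a + PySem.Str.len pg + 1) :: sums (a + PySem.Str.len pg + 1) rest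

theorem len_nonneg (s : String) : (0:Int) ≤ PySem.Str.len s := by
  simp [PySem.Str.len_eq]

theorem buildCum_snd : ∀ (pages : List String) (a : Int) (cum : List Int),
    (buildCum pages a cum).2 = cum ++ sums a pages := by
  intro pages
  induction pages with
  | nil => intro a cum; simp [buildCum, sums]
  | cons pg rest ih => intro a cum; simp [buildCum, sums, ih]

theorem sums_length : ∀ (pages : List String) (a : Int), (sums a pages).length = pages.length := by
  intro pages
  induction pages with
  | nil => intro a; simp [sums]
  | cons pg rest ih => intro a; simp [sums, ih]

theorem sums_gt : ∀ (pages : List String) (a : Int) (v : Int), v ∈ sums a pages → a < v := by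
  intro pages
  induction pages with
  | nil => intro a v h; simp [sums] at h
  | cons pg rest ih =>
      intro a v h
      simp only [sums, List.mem_cons] at h
      rcases h with h | h
      · have := len_nonneg pg; omega
      · have := ih _ _ h; have := len_nonneg pg; omega

theorem cum_pairwise' : ∀ (pages : List String) (a : Int),
    List.Pairwise (· < ·) (a :: sums a pages) := by
  intro pages
  induction pages with
  | nil => intro a; simp [sums]
  | cons pg rest ih =>
      intro a
      refine List.Pairwise.cons ?_ (ih _)
      intro v hv
      simp only [sums, List.mem_cons] at hv
      rcases hv with h | h
      · have := len_nonneg pg; omega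
      · have := sums_gt rest _ v h; have := len_nonneg pg; omega

theorem cum_pairwise (pages : List String) :
    List.Pairwise (· < ·) ((0:Int) :: sums 0 pages) := cum_pairwise' pages 0

theorem cum_mono (pages : List String) :
    ∀ i j : Nat, i ≤ j → j < ((0:Int) :: sums 0 pages).length →
      ((0:Int) :: sums 0 pages).getD i 0 ≤ ((0:Int) :: sums 0 pages).getD j 0 := by
  intro i j hij hj
  have hi : i < ((0:Int) :: sums 0 pages).length := lt_of_le_of_lt hij hj
  rw [List.getD_eq_getElem _ _ hi, List.getD_eq_getElem _ _ hj]
  rcases Nat.lt_or_ge i j with h | h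
  · exact le_of_lt ((List.pairwise_iff_getElem.1 (cum_pairwise pages)) i j hi hj h)
  · have : i = j := le_antisymm hij h
    subst this; exact le_rfl

theorem loopA_count (x : Int) : ∀ (pages : List String) (a i : Int),
    offsetLoopA x pages a i =
      if (sums a pages).countP (fun v => decide (v ≤ x)) < pages.length
      then some (i + ((sums a pages).countP (fun v => decide (v ≤ x)) : Int))
      else none := by
  intro pages
  induction pages with
  | nil => intro a i; simp [offsetLoopA, sums]
  | cons pg rest ih =>
      intro a i
      simp only [offsetLoopA, sums, List.countP_cons, List.length_cons, PySem.Str.len_eq]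
      by_cases hx : x < a + (pg.toList.length : Int) + 1
      · have hp : (decide (a + (pg.toList.length : Int) + 1 ≤ x)) = false := by
          exact decide_eq_false (by omega)
        have hc0 : (sums (a + (pg.toList.length : Int) + 1) rest).countP
            (fun v => decide (v ≤ x)) = 0 := by
          refine List.countP_eq_zero.2 ?_
          intro v hv
          have h1 := sums_gt rest (a + (pg.toList.length : Int) + 1) v hv
          simp only [decide_eq_true_eq]; omega
        rw [if_pos hx, hp, if_neg Bool.false_ne_true, hc0]
        rw [if_pos (by omega : 0 + 0 < rest.length + 1)]
        norm_num
      · rw [if_neg hx, ih]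
        have hp : (decide (a + (pg.toList.length : Int) + 1 ≤ x)) = true := by
          exact decide_eq_true (by omega)
        have hle := List.countP_le_length (l := sums (a + (pg.toList.length : Int) + 1) rest)
          (p := fun v => decide (v ≤ x))
        rw [sums_length] at hle
        rw [hp, if_pos rfl]
        split_ifs with h1 h2 h2
        · congr 1; push_cast; ring
        · omega
        · omega
        · rfl

theorem countP_of_partition (p : Int → Bool) :
    ∀ (l : List Int) (r : Nat), r ≤ l.length →
    (∀ k, k < r → p (l.getD k 0) = true) →
    (∀ k, r ≤ k → k < l.length → p (l.getD k 0) = false) →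
    l.countP p = r := by
  intro l
  induction l with
  | nil => intro r hr _ _; simp_all
  | cons a t ih =>
      intro r hr h1 h2
      cases r with
      | zero =>
          refine List.countP_eq_zero.2 ?_
          intro v hv
          obtain ⟨k, hk, hkv⟩ := List.mem_iff_getElem.1 hv
          have := h2 k (Nat.zero_le _) hk
          rw [List.getD_eq_getElem _ _ hk, hkv] at this
          simp [this]
      | succ r' =>
          have hpa : p a = true := by
            have := h1 0 (Nat.succ_pos _)
            simpa using this
          rw [List.countP_cons, hpa]
          have : t.countP p = r' := by
            refine ih r' (by simpa using hr) ?_ ?_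
            · intro k hk
              have := h1 (k + 1) (by omega)
              simpa using this
            · intro k hk hk2
              have := h2 (k + 1) (by omega) (by simpa using Nat.succ_lt_succ hk2)
              simpa using this
          simp [this]

theorem bsr_spec (x : Int) (cum : List Int)
    (mono : ∀ i j : Nat, i ≤ j → j < cum.length → cum.getD i 0 ≤ cum.getD j 0) :
    ∀ (n lo hi : Nat), hi - lo ≤ n → lo ≤ hi → hi ≤ cum.length →
    (∀ k, k < lo → cum.getD k 0 ≤ x) →
    (∀ k, hi ≤ k → k < cum.length → x < cum.getD k 0) →
    bsr x cum lo hi ≤ cum.length ∧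
    (∀ k, k < bsr x cum lo hi → cum.getD k 0 ≤ x) ∧
    (∀ k, bsr x cum lo hi ≤ k → k < cum.length → x < cum.getD k 0) := by
  intro n
  induction n with
  | zero =>
      intro lo hi hfuel hle hhi h1 h2
      have : lo = hi := by omega
      subst this
      rw [bsr]; simp only [lt_irrefl, dite_false]
      exact ⟨hhi, h1, fun k hk hk2 => h2 k hk hk2⟩
  | succ m ih =>
      intro lo hi hfuel hle hhi h1 h2
      rw [bsr]
      by_cases h : lo < hi
      · simp only [h, dite_true]
        set mid := (lo + hi) / 2 with hmid
        have hm1 : lo ≤ mid := by omega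
        have hm2 : mid < hi := by omega
        by_cases hx : x < cum.getD mid 0
        · simp only [hx, if_true]
          refine ih lo mid (by omega) (by omega) (by omega) h1 ?_
          intro k hk hk2
          exact lt_of_lt_of_le hx (mono mid k hk hk2)
        · simp only [hx, if_false]
          refine ih (mid + 1) hi (by omega) (by omega) hhi ?_ h2
          intro k hk
          have hkm : k ≤ mid := by omega
          have := mono k mid hkm (by omega)
          omega
      · simp only [h, dite_false]
        have : lo = hi := by omega
        subst this
        exact ⟨hhi, h1, fun k hk hk2 => h2 k hk hk2⟩

-- main computation on a nonempty page list
theorem main_eq (x : Int) (pg : String) (rest : List String) :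
    offset_to_page x (some (pg :: rest)) = offset_to_page_alt x (some (pg :: rest)) := by
  set pages := pg :: rest with hpages
  have hne : pages.length ≠ 0 := by simp [hpages]
  set cum := (0:Int) :: sums 0 pages with hcum
  set c := (sums 0 pages).countP (fun v => decide (v ≤ x)) with hc
  have hclen : c ≤ pages.length := by
    have := List.countP_le_length (l := sums 0 pages) (p := fun v => decide (v ≤ x))
    rw [sums_length] at this; exact this
  -- A's value
  have hA : offset_to_page x (some pages) =
      some (if c < pages.length then 1 + (c : Int) else (pages.length : Int)) := by
    rw [hpages]
    show some ((offsetLoopA x (pg :: rest) 0 1).getD ((pg :: rest).length : Int)) = _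
    rw [loopA_count]
    rw [← hpages, ← hc]
    split_ifs with h
    · simp
    · simp
  -- B's cum list
  have hbc : (buildCum pages 0 [0]).2 = cum := by
    rw [buildCum_snd]; simp [hcum]
  -- bsr result
  have hlen : cum.length = pages.length + 1 := by simp [hcum, sums_length]
  obtain ⟨hr1, hr2, hr3⟩ := bsr_spec x cum (cum_mono pages) cum.length 0 cum.length
    (by omega) (by omega) le_rfl (by omega) (by omega)
  set r := bsr x cum 0 cum.length with hr
  have hrcount : cum.countP (fun v => decide (v ≤ x)) = r := by
    refine countP_of_partition _ cum r hr1 ?_ ?_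
    · intro k hk; exact decide_eq_true (hr2 k hk)
    · intro k hk hk2
      have := hr3 k hk hk2
      exact decide_eq_false (by omega)
  have hsplit : cum.countP (fun v => decide (v ≤ x)) =
      (if (0:Int) ≤ x then 1 else 0) + c := by
    rw [hcum, List.countP_cons, ← hc]
    by_cases h0 : (0:Int) ≤ x
    · rw [decide_eq_true h0, if_pos h0, if_pos rfl]; omega
    · rw [decide_eq_false h0, if_neg h0, if_neg Bool.false_ne_true]; omega
  -- B's value
  have hB : offset_to_page_alt x (some pages) =
      some (max 1 (min (r : Int) (pages.length : Int))) := by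
    rw [hpages]
    show some (max 1 (min ((bsr x ((buildCum (pg :: rest) 0 [0]).2) 0
        ((buildCum (pg :: rest) 0 [0]).2).length : Nat) : Int) (((pg :: rest).length : Nat) : Int))) = _
    rw [← hpages, hbc, hr]
  rw [hA, hB]
  congr 1
  by_cases h0 : (0:Int) ≤ x
  · have hre : r = 1 + c := by rw [← hrcount, hsplit, if_pos h0]
    rw [hre]
    split_ifs with h
    · push_cast; omega
    · push_cast; omega
  · have hc0 : c = 0 := by
      rw [hc]
      refine List.countP_eq_zero.2 ?_
      intro v hv
      have := sums_gt pages 0 v hv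
      simp only [decide_eq_true_eq]; omega
    have hre : r = 0 := by rw [← hrcount, hsplit, if_neg h0, hc0]
    rw [hre, hc0, if_pos (by omega)]
    omega

-- ===== VERDICT (by name: the statement is the Claim_ definition above) =====
theorem offset_to_page_spec : Claim_equal_offset_to_page := by
  intro x pts _
  unfold Spec_offset_to_page
  match pts with
  | none => rfl
  | some [] => rfl
  | some (pg :: rest) => exact main_eq x pg rest
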